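-- pv_equiv track=rewrite | github.com/UniqueIsem/AutomataTheory_Hw | kleene_lock.py | generate_kleene_closure
-- ===== SOURCE A (Python) =====
-- def generate_kleene_closure(words, level):
--     if level == 0:
--         return [""]
--     result = []
--     for w in generate_kleene_closure(words, level - 1):
--         for word in words:
--             result.append(w + word)
--     return result
-- ===== SOURCE B (Python) =====
-- def generate_kleene_closure(words, level):
--     result = [""]
--     for _ in range(level):
--         result = [w + word for w in result for word in words]
--     return result
-- ===== Notes on version B (the rewrite author's own statement) =====
-- stated objective: simpler
-- what changed: Replaces the top-down recursion (recursive call then nested append loops) with a bottom-up iterative loop that starts from [""] and expands the accumulated prefixes level times with a comprehension, preserving the prefix-first order.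
import Mathlib
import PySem

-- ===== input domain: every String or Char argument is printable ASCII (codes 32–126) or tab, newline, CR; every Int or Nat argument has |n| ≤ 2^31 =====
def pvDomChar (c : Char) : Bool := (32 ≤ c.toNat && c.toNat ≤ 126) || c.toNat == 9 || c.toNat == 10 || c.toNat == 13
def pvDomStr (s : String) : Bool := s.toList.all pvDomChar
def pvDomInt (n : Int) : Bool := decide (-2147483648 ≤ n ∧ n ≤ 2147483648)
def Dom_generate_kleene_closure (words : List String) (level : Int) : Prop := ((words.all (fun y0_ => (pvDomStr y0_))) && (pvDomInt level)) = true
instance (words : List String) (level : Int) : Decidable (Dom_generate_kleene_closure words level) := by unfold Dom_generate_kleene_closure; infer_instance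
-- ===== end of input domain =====

-- B replaces A's top-down recursion with a bottom-up iterative expansion loop (same cost, simpler); A raises RecursionError for level < 0, excluded by Pre_.


-- ===== PORT A =====
-- A's recursion on `level`, transcribed on the Nat measure; for level < 0 Python
-- has no base case and raises RecursionError (those inputs are outside Pre_).
def gkcA (words : List String) : Nat → List String
  | 0 => [""]
  | n + 1 =>
      -- result = []; for w in rec: for word in words: result.append(w + word)
      (gkcA words n).foldl
        (fun result w => words.foldl (fun result word => result ++ [w ++ word]) result) []

def generate_kleene_closure (words : List String) (level : Int) : List String :=
  gkcA words level.toNat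

-- ===== PORT B =====
-- result = [""]; for _ in range(level): result = [w + word for w in result for word in words]
def generate_kleene_closure_alt (words : List String) (level : Int) : List String :=
  (PySem.List.pyRange 0 level 1).foldl
    (fun result _ => result.flatMap (fun w => words.map (fun word => w ++ word))) [""]

-- ===== PRECONDITION & SPEC =====
-- Pre_ excludes level < 0, on which Python A recurses without a base case and raises RecursionError.
def Pre_generate_kleene_closure (words : List String) (level : Int) : Prop := 0 ≤ level
instance (words : List String) (level : Int) : Decidable (Pre_generate_kleene_closure words level) := by unfold Pre_generate_kleene_closure; infer_instance
def pvWitness_generate_kleene_closure : List String × Int := (["ab", "c"], 2)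


def Spec_generate_kleene_closure (words : List String) (level : Int) (out : List String) : Prop := out = generate_kleene_closure_alt words level
instance (words : List String) (level : Int) (out : List String) : Decidable (Spec_generate_kleene_closure words level out) := by unfold Spec_generate_kleene_closure; infer_instance

-- ===== CLAIM (what is proved, stated in full; the proofs are below) =====
def Claim_equal_generate_kleene_closure : Prop := ∀ (words : List String) (level : Int), Dom_generate_kleene_closure words level → Pre_generate_kleene_closure words level → Spec_generate_kleene_closure words level (generate_kleene_closure words level)

-- ===== LEMMAS AND PROOFS =====

-- A's inner loop over `words` appends one word each turn: it is acc ++ map.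
theorem gkc_inner (words : List String) (w : String) (acc : List String) :
    words.foldl (fun result word => result ++ [w ++ word]) acc
      = acc ++ words.map (fun word => w ++ word) := by
  induction words generalizing acc with
  | nil => simp
  | cons x xs ih => simp [List.foldl, ih]

-- A's outer loop is therefore a flatMap of the recursive result.
theorem gkc_outer (words l : List String) (acc : List String) :
    l.foldl (fun result w => words.foldl (fun result word => result ++ [w ++ word]) result) acc
      = acc ++ l.flatMap (fun w => words.map (fun word => w ++ word)) := by
  induction l generalizing acc with
  | nil => simp
  | cons x xs ih =>
      rw [List.foldl_cons, gkc_inner, ih, List.flatMap_cons, List.append_assoc]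

-- B's n-turn loop from [""] computes exactly A's recursion gkcA at depth n.
theorem gkc_loop (words : List String) (n : Nat) :
    (PySem.List.pyRange 0 n 1).foldl
      (fun result _ => result.flatMap (fun w => words.map (fun word => w ++ word))) [""]
      = gkcA words n := by
  induction n with
  | zero => simp [gkcA]
  | succ m ih =>
      have h : PySem.List.pyRange 0 ((m : Int) + 1) 1
          = PySem.List.pyRange 0 (m : Int) 1 ++ [(m : Int)] :=
        PySem.List.pyRange_one_succ_right (by exact_mod_cast Nat.zero_le m)
      have : ((m + 1 : Nat) : Int) = (m : Int) + 1 := by push_cast; ring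
      rw [this, h, List.foldl_append, ih,
        List.foldl_cons, List.foldl_nil]
      have hrec : gkcA words (m + 1)
          = [] ++ (gkcA words m).flatMap (fun w => words.map (fun word => w ++ word)) :=
        gkc_outer words (gkcA words m) []
      rw [hrec, List.nil_append]

-- ===== VERDICT (by name: the statement is the Claim_ definition above) =====
theorem generate_kleene_closure_spec : Claim_equal_generate_kleene_closure := by
  intro words level _ hpre
  unfold Spec_generate_kleene_closure generate_kleene_closure generate_kleene_closure_alt
  have hlev : (level.toNat : Int) = level := Int.toNat_of_nonneg hpre
  rw [← hlev, gkc_loop]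
  congr 1
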